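-- pv_equiv track=rewrite | github.com/arijort/prep | ctci/foobar-cake.py | solution
-- ===== SOURCE A (Python) =====
-- def solution(s):
--   l = len(s)
--   max_slices = 1
--   for divisor in range(l, 0, -1):
--     if l % divisor != 0: # skip this divisor if we can't make equal sized slices
--       continue
--     size_slice = int(l / divisor)
--     cake_segments = [ s[i:i+size_slice] for i in range(0,l,size_slice) ]
--     if len(set(cake_segments)) == 1:
--       max_slices = max(max_slices, divisor)
--   return max_slices
-- ===== SOURCE B (Python) =====
-- def solution(s):
--   l = len(s)
--   for p in range(1, l + 1):
--     if l % p == 0 and s[p:] == s[:-p]: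
--       return l // p
--   return 1
-- ===== Notes on version B (the rewrite author's own statement) =====
-- stated objective: faster
-- what changed: A cuts the string into segments and deduplicates them through a set for every divisor of len(s); B ascends over candidate slice sizes p and returns l // p at the first p with l % p == 0 and s[p:] == s[:-p] (single-comparison periodicity test, early exit, no segment lists or sets).
import Mathlib
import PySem

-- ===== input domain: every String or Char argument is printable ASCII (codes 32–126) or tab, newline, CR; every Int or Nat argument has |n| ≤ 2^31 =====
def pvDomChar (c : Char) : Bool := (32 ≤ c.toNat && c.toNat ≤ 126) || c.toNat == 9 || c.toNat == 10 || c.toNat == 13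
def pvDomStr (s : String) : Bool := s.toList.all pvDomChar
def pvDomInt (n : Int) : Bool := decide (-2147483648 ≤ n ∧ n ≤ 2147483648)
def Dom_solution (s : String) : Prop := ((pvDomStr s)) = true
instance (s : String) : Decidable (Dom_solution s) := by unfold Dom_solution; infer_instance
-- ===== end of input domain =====

-- B replaces A's scan over every divisor (cutting the string into segments and
-- deduplicating them through a set per divisor) by an ascending search for the
-- smallest slice size p with l % p == 0 and s[p:] == s[:-p] (a single-comparison
-- periodicity test), returning l // p at the first hit.

-- ===== PORT A =====
def solution (s : String) : Int :=
  let l : Int := PySem.Str.len s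
  (PySem.List.pyRange l 0 (-1)).foldl
    (fun maxSlices divisor =>
      if PySem.Int.mod l divisor ≠ 0 then maxSlices
      else
        -- int(l / divisor): the division is exact on this branch (divisor ∣ l),
        -- so Python's float division + int() equals floor division here
        let sizeSlice : Int := PySem.Int.floordiv l divisor
        let cakeSegments := (PySem.List.pyRange 0 l sizeSlice).map
          (fun i => PySem.Str.slice s (some i) (some (i + sizeSlice)))
        if (PySem.Set.ofList cakeSegments).length = 1 then max maxSlices divisor
        else maxSlices)
    1

-- ===== PORT B =====
def solution_alt (s : String) : Int :=
  let l : Int := PySem.Str.len s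
  match (PySem.List.pyRange 1 (l + 1) 1).find?
      (fun p => PySem.Int.mod l p == 0 &&
        PySem.Str.slice s (some p) none == PySem.Str.slice s none (some (-p))) with
  | some p => PySem.Int.floordiv l p
  | none => 1

-- ===== PRECONDITION & SPEC =====
def Spec_solution (s : String) (out : Int) : Prop := out = solution_alt s
instance (s : String) (out : Int) : Decidable (Spec_solution s out) := by unfold Spec_solution; infer_instance

-- ===== CLAIM (what is proved, stated in full; the proofs are below) =====
def Claim_equal_solution : Prop := ∀ (s : String), Dom_solution s → Spec_solution s (solution s)

-- ===== LEMMAS AND PROOFS =====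


lemma nodup_all_eq_singleton {α : Type} {l : List α} {a : α}
    (hne : l ≠ []) (hall : ∀ x ∈ l, x = a) (hnd : l.Nodup) : l = [a] := by
  match l, hnd with
  | [], _ => exact absurd rfl hne
  | [x], _ => simp [hall x (by simp)]
  | x :: y :: t, hnd =>
    have hx := hall x (by simp)
    have hy := hall y (by simp)
    subst hx
    rw [hy] at hnd
    simp at hnd

lemma set_len_one {α : Type} [BEq α] [LawfulBEq α] (xs : List α) :
    (PySem.Set.ofList xs).length = 1 ↔ xs ≠ [] ∧ ∀ x ∈ xs, ∀ δ ∈ xs, x = δ := by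
  constructor
  · intro h
    obtain ⟨a, ha⟩ := List.length_eq_one_iff.mp h
    constructor
    · intro hnil
      subst hnil
      simp [PySem.Set.ofList] at ha
    · intro x hx δ hδ
      have h1 : x ∈ PySem.Set.ofList xs := (PySem.Set.mem_ofList xs x).mpr hx
      have h2 : δ ∈ PySem.Set.ofList xs := (PySem.Set.mem_ofList xs δ).mpr hδ
      rw [ha] at h1 h2
      simp at h1 h2
      rw [h1, h2]
  · rintro ⟨hne, hall⟩
    obtain ⟨x, hx⟩ := List.exists_mem_of_ne_nil xs hne
    have : PySem.Set.ofList xs = [x] := by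
      apply nodup_all_eq_singleton
      · intro hnil
        have := (PySem.Set.mem_ofList xs x).mpr hx
        simp [hnil] at this
      · intro y hy
        exact hall y ((PySem.Set.mem_ofList xs y).mp hy) x hx
      · exact PySem.Set.nodup_ofList xs
    simp [this]


lemma shift_iff_getElem (cs : List Char) (p : Nat) :
    (cs.drop p = cs.take (cs.length - p)) ↔
      (∀ i, (h : i + p < cs.length) → cs[i + p] = cs[i]'(by omega)) := by
  constructor
  · intro hEq i h
    have h1 : (List.drop p cs)[i]? = cs[p + i]? := List.getElem?_drop ..
    have h2 : (List.take (cs.length - p) cs)[i]? = cs[i]? := by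
      rw [List.getElem?_take_of_lt (by omega)]
    rw [hEq, h2] at h1
    have hpi : p + i = i + p := by omega
    rw [hpi] at h1
    have e1 : cs[i + p]? = some (cs[i + p]'h) := List.getElem?_eq_getElem h
    have e2 : cs[i]? = some (cs[i]'(by omega)) := List.getElem?_eq_getElem (by omega)
    rw [e1, e2] at h1
    exact Option.some.inj h1.symm
  · intro hshift
    apply List.ext_getElem?
    intro i
    rcases lt_or_ge i (cs.length - p) with hi | hi
    · rw [List.getElem?_drop, List.getElem?_take_of_lt hi]
      have hpi : p + i = i + p := by omega
      rw [hpi]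
      have e1 : cs[i + p]? = some (cs[i + p]'(by omega)) := List.getElem?_eq_getElem (by omega)
      have e2 : cs[i]? = some (cs[i]'(by omega)) := List.getElem?_eq_getElem (by omega)
      rw [e1, e2, hshift i (by omega)]
    · rw [List.getElem?_eq_none (by simp; omega), List.getElem?_eq_none (by simp; omega)]


lemma shift_iterate (cs : List Char) (p : Nat)
    (hs : ∀ i, (h : i + p < cs.length) → cs[i + p] = cs[i]'(by omega)) :
    ∀ j t, (h : j * p + t < cs.length) → t < p → cs[j * p + t] = cs[t]'(by omega) := by
  intro j
  induction j with
  | zero => intro t h ht; simp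
  | succ j ih =>
    intro t h ht
    have e : (j + 1) * p + t = (j * p + t) + p := by ring
    have h1 : (j * p + t) + p < cs.length := by omega
    calc cs[(j + 1) * p + t] = cs[(j * p + t) + p]'(by omega) := by congr 1
      _ = cs[j * p + t]'(by omega) := hs _ h1
      _ = cs[t]'(by omega) := ih t (by omega) ht

lemma chunks_iff_shift (cs : List Char) (p k : Nat) (hp : 0 < p) (hk : p * k = cs.length) :
    (∀ j < k, (cs.drop (j * p)).take p = cs.take p) ↔
      (∀ i, (h : i + p < cs.length) → cs[i + p] = cs[i]'(by omega)) := by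
  constructor
  · intro hch i h
    set j := i / p with hj
    set t := i % p with ht
    have hdm : p * j + t = i := Nat.div_add_mod i p
    have hcm : j * p = p * j := Nat.mul_comm j p
    have hit : i = j * p + t := by omega
    have htp : t < p := Nat.mod_lt _ hp
    have hj1k : j + 1 < k := by nlinarith
    have c0 : ∀ j', (hj' : j' < k) → ∀ t', (ht' : t' < p) →
        cs[j' * p + t']'(by nlinarith) = cs[t']'(by nlinarith) := by
      intro j' hj' t' ht'
      have hchj := hch j' hj'
      have e1 : ((cs.drop (j' * p)).take p)[t']? = (cs.take p)[t']? := by rw [hchj]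
      rw [List.getElem?_take_of_lt ht', List.getElem?_drop, List.getElem?_take_of_lt ht'] at e1
      have b1 : j' * p + t' < cs.length := by nlinarith
      have b2 : t' < cs.length := by nlinarith
      rw [List.getElem?_eq_getElem b1, List.getElem?_eq_getElem b2] at e1
      exact Option.some.inj e1
    have e1 : cs[i + p]'h = cs[t]'(by omega) := by
      have hip : i + p = (j + 1) * p + t := by rw [hit]; ring
      calc cs[i + p]'h = cs[(j + 1) * p + t]'(by omega) := by congr 1
        _ = cs[t]'(by nlinarith) := c0 (j + 1) hj1k t htp
    have e2 : cs[i]'(by omega) = cs[t]'(by omega) := by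
      calc cs[i]'(by omega) = cs[j * p + t]'(by omega) := by congr 1
        _ = cs[t]'(by nlinarith) := c0 j (by omega) t htp
    rw [e1, e2]
  · intro hs j hj
    apply List.ext_getElem?
    intro t
    rcases lt_or_ge t p with ht | ht
    · rw [List.getElem?_take_of_lt ht, List.getElem?_take_of_lt ht, List.getElem?_drop]
      have b1 : j * p + t < cs.length := by nlinarith
      have b2 : t < cs.length := by nlinarith
      rw [List.getElem?_eq_getElem b1, List.getElem?_eq_getElem b2]
      exact congrArg some (shift_iterate cs p hs j t b1 ht)
    · rw [List.getElem?_eq_none (by simp; omega), List.getElem?_eq_none (by simp; omega)]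


lemma foldl_maxif (c : Int → Bool) (L : List Int) (init : Int) :
    init ≤ L.foldl (fun m d => if c d then max m d else m) init ∧
    (L.foldl (fun m d => if c d then max m d else m) init = init ∨
      (L.foldl (fun m d => if c d then max m d else m) init ∈ L ∧
        c (L.foldl (fun m d => if c d then max m d else m) init) = true)) ∧
    (∀ d ∈ L, c d = true → d ≤ L.foldl (fun m d => if c d then max m d else m) init) := by
  induction L generalizing init with
  | nil => simp
  | cons x t ih =>
    simp only [List.foldl_cons]
    by_cases hx : c x
    · simp only [hx, if_pos]
      obtain ⟨ih1, ih2, ih3⟩ := ih (max init x)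
      refine ⟨le_trans (le_max_left _ _) ih1, ?_, ?_⟩
      · rcases ih2 with h | ⟨hm, hc⟩
        · rcases max_choice init x with hmx | hmx
          · left; rw [h, hmx]
          · right
            rw [h, hmx]
            exact ⟨by simp, hx⟩
        · right; exact ⟨by simp [hm], hc⟩
      · intro d hd hcd
        rcases List.mem_cons.mp hd with rfl | hdt
        · exact le_trans (le_max_right _ _) ih1
        · exact ih3 d hdt hcd
    · simp only [hx, if_neg, Bool.false_eq_true, not_false_iff]
      obtain ⟨ih1, ih2, ih3⟩ := ih init
      refine ⟨ih1, ?_, ?_⟩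
      · rcases ih2 with h | ⟨hm, hc⟩
        · left; exact h
        · right; exact ⟨by simp [hm], hc⟩
      · intro d hd hcd
        rcases List.mem_cons.mp hd with rfl | hdt
        · simp [hcd] at hx
        · exact ih3 d hdt hcd

lemma find?_pyRange_one (f : Int → Bool) (a b p : Int)
    (h : (PySem.List.pyRange a b 1).find? f = some p) :
    a ≤ p ∧ p < b ∧ f p = true ∧ ∀ x, a ≤ x → x < p → f x = false := by
  obtain ⟨hfp, as, bs, hsplit, hprev⟩ := List.find?_eq_some_iff_append.mp h
  have hmem : p ∈ PySem.List.pyRange a b 1 := by rw [hsplit]; simp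
  obtain ⟨hap, hpb⟩ := PySem.List.mem_pyRange_one.mp hmem
  refine ⟨hap, hpb, hfp, ?_⟩
  intro x hax hxp
  have hx : x ∈ as := by
    have hxmem : x ∈ PySem.List.pyRange a b 1 := PySem.List.mem_pyRange_one.mpr ⟨hax, by omega⟩
    rw [hsplit] at hxmem
    rcases List.mem_append.mp hxmem with h1 | h2
    · exact h1
    · rcases List.mem_cons.mp h2 with rfl | h3
      · omega
      · -- x ∈ bs: but pyRange is sorted ascending; elements after p are > p
        exfalso
        have hpw : (PySem.List.pyRange a b 1).Pairwise (· < ·) := PySem.List.pairwise_lt_pyRange_one ..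
        rw [hsplit] at hpw
        have := (List.pairwise_append.mp hpw).2.1
        have := List.rel_of_pairwise_cons this h3
        omega
  have := hprev x hx
  simpa using this


lemma qb_iff (s : String) (p : Nat) (hp : 1 ≤ p) :
    (((PySem.Int.mod (s.toList.length : Int) (p : Int) == 0) &&
      (PySem.Str.slice s (some (p : Int)) none == PySem.Str.slice s none (some (-(p : Int))))) = true)
    ↔ (p ∣ s.toList.length ∧
       s.toList.drop p = s.toList.take (s.toList.length - p)) := by
  rw [Bool.and_eq_true, beq_iff_eq, beq_iff_eq]
  constructor
  · rintro ⟨h1, h2⟩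
    refine ⟨?_, ?_⟩
    · have := (PySem.Int.mod_eq_zero_iff_dvd _ _).mp h1
      exact_mod_cast this
    · have h3 := congrArg String.toList h2
      rw [PySem.Str.toList_slice, PySem.Str.toList_slice] at h3
      simp only [PySem.Chars.slice_eq_listSlice] at h3
      rw [PySem.List.slice_from_natCast, PySem.List.slice_to_neg_natCast _ p hp] at h3
      exact h3
  · rintro ⟨h1, h2⟩
    refine ⟨(PySem.Int.mod_eq_zero_iff_dvd _ _).mpr (by exact_mod_cast h1), ?_⟩
    apply String.toList_inj.mp
    rw [PySem.Str.toList_slice, PySem.Str.toList_slice]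
    simp only [PySem.Chars.slice_eq_listSlice]
    rw [PySem.List.slice_from_natCast, PySem.List.slice_to_neg_natCast _ p hp]
    exact h2

-- the count of chunks produced by range(0, l, p) when p * k = l, p > 0, l > 0
lemma pyRange_chunks (L p k : Nat) (hp : 0 < p) (hk : p * k = L) (hL : 0 < L) :
    PySem.List.pyRange 0 (L : Int) (p : Int) =
      (List.range k).map (fun j => ((j * p : Nat) : Int)) := by
  rw [PySem.List.pyRange_of_pos _ _ (by exact_mod_cast hp)]
  have hcount : (((L : Int) - 0 + (p : Int) - 1) / (p : Int)).toNat = k := by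
    have h1 : (L : Int) - 0 + (p : Int) - 1 = ((p : Int) - 1) + (p : Int) * (k : Int) := by
      push_cast [← hk]; ring
    rw [h1, Int.add_mul_ediv_left _ _ (by exact_mod_cast hp.ne' : (p : Int) ≠ 0)]
    rw [Int.ediv_eq_zero_of_lt (by omega) (by omega)]
    simp
  rw [if_pos (by exact_mod_cast hL : (0 : Int) < (L : Int)), hcount]
  apply List.map_congr_left
  intro j hj
  push_cast
  ring

-- A's segment condition, characterized
lemma condA_iff (s : String) (d : Nat) (hd1 : 1 ≤ d) (hdvd : d ∣ s.toList.length)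
    (hL : 0 < s.toList.length) :
    ((PySem.Set.ofList ((PySem.List.pyRange 0 (s.toList.length : Int)
        (PySem.Int.floordiv (s.toList.length : Int) (d : Int))).map
        (fun i => PySem.Str.slice s (some i)
          (some (i + PySem.Int.floordiv (s.toList.length : Int) (d : Int)))))).length = 1)
    ↔ (s.toList.drop (s.toList.length / d) =
       s.toList.take (s.toList.length - s.toList.length / d)) := by
  set cs := s.toList with hcs
  set L := cs.length with hLdef
  set p := L / d with hpdef
  have hk : p * d = L := Nat.div_mul_cancel hdvd
  have hdL : d ≤ L := Nat.le_of_dvd hL hdvd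
  have hp : 0 < p := Nat.div_pos hdL (by omega)
  have hfd : PySem.Int.floordiv (L : Int) (d : Int) = (p : Int) := by
    rw [hpdef]; exact PySem.Int.floordiv_natCast L d
  rw [hfd]
  rw [pyRange_chunks L p d hp hk hL]
  rw [List.map_map]
  have hseg : ∀ j : Nat, PySem.Str.slice s (some ((j * p : Nat) : Int))
      (some (((j * p : Nat) : Int) + (p : Int))) =
      String.ofList ((cs.drop (j * p)).take p) := by
    intro j
    apply String.toList_inj.mp
    rw [PySem.Str.toList_slice]
    simp only [PySem.Chars.slice_eq_listSlice]
    have : ((j * p : Nat) : Int) + (p : Int) = (((j * p) : Nat) : Int) + ((p : Nat) : Int) := by push_cast; ring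
    rw [this, PySem.List.slice_natCast_add]
    simp [← hcs]
  simp only [Function.comp_def, hseg]
  rw [set_len_one]
  constructor
  · rintro ⟨hne, hall⟩
    rw [shift_iff_getElem] at *
    rw [← chunks_iff_shift cs p d hp hk]
    intro j hj
    have h1 := hall (String.ofList ((cs.drop (j * p)).take p))
      (List.mem_map.mpr ⟨j, List.mem_range.mpr hj, rfl⟩)
      (String.ofList ((cs.drop (0 * p)).take p))
      (List.mem_map.mpr ⟨0, List.mem_range.mpr (by omega), rfl⟩)
    have h2 := congrArg String.toList h1
    simpa using h2
  · intro hshift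
    refine ⟨by simp [List.range_eq_nil]; omega, ?_⟩
    rw [shift_iff_getElem] at hshift
    have hch := (chunks_iff_shift cs p d hp hk).mpr hshift
    rintro x hx y hy
    obtain ⟨j1, hj1, rfl⟩ := List.mem_map.mp hx
    obtain ⟨j2, hj2, rfl⟩ := List.mem_map.mp hy
    rw [hch j1 (List.mem_range.mp hj1), hch j2 (List.mem_range.mp hj2)]

-- A's loop condition as one boolean test
def condA (s : String) (d : Int) : Bool :=
  (PySem.Int.mod (s.toList.length : Int) d == 0) &&
  decide ((PySem.Set.ofList ((PySem.List.pyRange 0 (s.toList.length : Int)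
      (PySem.Int.floordiv (s.toList.length : Int) d)).map
      (fun i => PySem.Str.slice s (some i)
        (some (i + PySem.Int.floordiv (s.toList.length : Int) d))))).length = 1)

lemma condA_nat_iff (s : String) (d : Nat) (hd1 : 1 ≤ d)
    (hLpos : 0 < s.toList.length) :
    condA s (d : Int) = true ↔
      (d ∣ s.toList.length ∧ s.toList.drop (s.toList.length / d) =
        s.toList.take (s.toList.length - s.toList.length / d)) := by
  unfold condA
  rw [Bool.and_eq_true, beq_iff_eq, decide_eq_true_iff]
  constructor
  · rintro ⟨h1, h2⟩
    have hdvd : d ∣ s.toList.length := by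
      have := (PySem.Int.mod_eq_zero_iff_dvd _ _).mp h1
      exact_mod_cast this
    exact ⟨hdvd, (condA_iff s d hd1 hdvd hLpos).mp h2⟩
  · rintro ⟨hdvd, h2⟩
    exact ⟨(PySem.Int.mod_eq_zero_iff_dvd _ _).mpr (by exact_mod_cast hdvd),
      (condA_iff s d hd1 hdvd hLpos).mpr h2⟩

-- ===== VERDICT (by name: the statement is the Claim_ definition above) =====
theorem solution_spec : Claim_equal_solution := by
  intro s _
  unfold Spec_solution
  unfold solution solution_alt
  by_cases h0 : s.toList.length = 0
  · simp only [PySem.Str.len_eq, h0, Nat.cast_zero]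
    rw [PySem.List.pyRange_neg_one_eq_nil (by norm_num),
        PySem.List.pyRange_one_eq_nil (by norm_num)]
    simp
  · have hLpos : 0 < s.toList.length := Nat.pos_of_ne_zero h0
    -- replace A's loop body by the condA form
    rw [List.foldl_ext _ (fun (m d : Int) => if condA s d then max m d else m) 1
      (by
        intro m d _
        simp only [PySem.Str.len_eq, condA, Bool.and_eq_true, beq_iff_eq,
          decide_eq_true_iff, ne_eq, ite_not]
        split_ifs <;> tauto)]
    simp only []
    split
    case _ p₀ hp₀ =>
      -- B found the least good slice size p₀
      obtain ⟨h1p₀, hp₀L, hfp₀, hmin⟩ := find?_pyRange_one _ _ _ _ hp₀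
      simp only [PySem.Str.len_eq] at hp₀L
      rw [PySem.Str.len_eq] at hfp₀ hmin ⊢
      set P := p₀.toNat with hPdef
      have hPp₀ : (P : Int) = p₀ := Int.toNat_of_nonneg (by omega)
      have hPgood : P ∣ s.toList.length ∧
          s.toList.drop P = s.toList.take (s.toList.length - P) := by
        apply (qb_iff s P (by omega)).mp
        rw [hPp₀]
        exact hfp₀
      have hP1 : 1 ≤ P := by omega
      have hPL : P ≤ s.toList.length := by omega
      have hBval : PySem.Int.floordiv ((s.toList.length : Nat) : Int) p₀ =
          ((s.toList.length / P : Nat) : Int) := by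
        rw [← hPp₀]; exact PySem.Int.floordiv_natCast _ P
      rw [hBval]
      obtain ⟨hge, hcases, hub⟩ := foldl_maxif (condA s)
        (PySem.List.pyRange (PySem.Str.len s) 0 (-1)) 1
      rw [PySem.Str.len_eq] at hge hcases hub
      have hD₀dvd : (s.toList.length / P) ∣ s.toList.length := Nat.div_dvd_of_dvd hPgood.1
      have hD₀1 : 1 ≤ s.toList.length / P := Nat.div_pos hPL (by omega)
      have hD₀L : s.toList.length / P ≤ s.toList.length := Nat.div_le_self _ _
      have hcAD₀ : condA s ((s.toList.length / P : Nat) : Int) = true := by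
        apply (condA_nat_iff s _ hD₀1 hLpos).mpr
        refine ⟨hD₀dvd, ?_⟩
        rw [Nat.div_div_self hPgood.1 h0]
        exact hPgood.2
      have hD₀r := hub ((s.toList.length / P : Nat) : Int)
        (PySem.List.mem_pyRange_neg_one.mpr (by omega)) hcAD₀
      rcases hcases with h1 | ⟨hmem, hcAr⟩
      · omega
      · obtain ⟨hr0, hrL⟩ := PySem.List.mem_pyRange_neg_one.mp hmem
        set r := (PySem.List.pyRange ((s.toList.length : Nat) : Int) 0 (-1)).foldl
          (fun m d => if condA s d then max m d else m) 1 with hr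
        set n := r.toNat with hndef
        have hnr : (n : Int) = r := Int.toNat_of_nonneg (by omega)
        have hncA : condA s (n : Int) = true := by rw [hnr]; exact hcAr
        obtain ⟨hndvd, hncond⟩ := (condA_nat_iff s n (by omega) hLpos).mp hncA
        have hQdvd : (s.toList.length / n) ∣ s.toList.length := Nat.div_dvd_of_dvd hndvd
        have hQ1 : 1 ≤ s.toList.length / n :=
          Nat.div_pos (Nat.le_of_dvd hLpos hndvd) (by omega)
        have hQgood : ((PySem.Int.mod (s.toList.length : Int)
            ((s.toList.length / n : Nat) : Int) == 0) &&
            (PySem.Str.slice s (some ((s.toList.length / n : Nat) : Int)) none ==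
              PySem.Str.slice s none (some (-((s.toList.length / n : Nat) : Int))))) = true := by
          apply (qb_iff s _ hQ1).mpr
          exact ⟨hQdvd, hncond⟩
        have hPQ : P ≤ s.toList.length / n := by
          by_contra hcon
          have hfalse := hmin ((s.toList.length / n : Nat) : Int) (by omega) (by omega)
          simp only [hfalse] at hQgood
          exact Bool.false_ne_true hQgood
        have hnQ : n = s.toList.length / (s.toList.length / n) :=
          (Nat.div_div_self hndvd h0).symm
        have hle : n ≤ s.toList.length / P := by
          rw [hnQ]
          exact Nat.div_le_div_left hPQ (by omega)
        omega
    case _ hnone =>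
      -- impossible: p = len(s) satisfies the predicate
      exfalso
      have hqbL : ((PySem.Int.mod (s.toList.length : Int) ((s.toList.length : Nat) : Int) == 0) &&
          (PySem.Str.slice s (some ((s.toList.length : Nat) : Int)) none ==
            PySem.Str.slice s none (some (-((s.toList.length : Nat) : Int))))) = true :=
        (qb_iff s s.toList.length (by omega)).mpr ⟨dvd_refl _, by simp⟩
      have := List.find?_eq_none.mp hnone ((s.toList.length : Nat) : Int)
        (by
          rw [PySem.Str.len_eq]
          exact PySem.List.mem_pyRange_one.mpr (by omega))
      rw [PySem.Str.len_eq] at this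
      simp only [hqbL] at this
      exact this trivial
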